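-- pv_equiv track=rewrite | github.com/vivax3794/BCrushPy | core.py | find_jump
-- ===== SOURCE A (Python) =====
-- from typing import Dict
--
-- def find_jump(code: str) -> Dict[int, int]:
--     """
--     Find the jumps so we don't have to do it during runtime
--     :param code:
--     :return: A Dict of the {code_pos_of_jump: jump_to}
--     """
--     jumps = {}
--     code_pos = 0
--
--     while code_pos < len(code):
--         letter = code[code_pos]
--         if letter == "[":
--             needed = 1
--             for searching_code_pos, searching_letter in enumerate(code[code_pos + 1:]):
--                 if searching_letter == "[":
--                     needed += 1
--                 if searching_letter == "]":
--                     needed -= 1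
--
--                 if needed == 0:
--                     break
--             else:
--                 raise SyntaxError("Miss matched [ and ]")
--
--             jump_to_pos = code_pos + searching_code_pos + 1
--             jumps[code_pos] = jump_to_pos
--             jumps[jump_to_pos] = code_pos
--
--         code_pos += 1
--
--     return jumps
-- ===== SOURCE B (Python) =====
-- def find_jump(code: str):
--     """
--     Find the jumps so we don't have to do it during runtime
--     :param code:
--     :return: A Dict of the {code_pos_of_jump: jump_to}
--     """
--     stack = []
--     pairs = []
--     for pos, letter in enumerate(code):
--         if letter == "[":
--             stack.append(pos)
--         elif letter == "]" and stack:
--             pairs.append((stack.pop(), pos))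
--     if stack:
--         raise SyntaxError("Miss matched [ and ]")
--     pairs.sort(key=lambda p: p[0])
--     jumps = {}
--     for o, c in pairs:
--         jumps[o] = c
--         jumps[c] = o
--     return jumps
-- ===== Notes on version B (the rewrite author's own statement) =====
-- stated objective: faster
-- what changed: replaces the per-'[' forward rescan (O(n) scan for every opening bracket) with a single left-to-right pass that keeps a stack of open-'[' positions, then sorts the matched pairs by opening position to reproduce A's dict insertion order
import Mathlib
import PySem

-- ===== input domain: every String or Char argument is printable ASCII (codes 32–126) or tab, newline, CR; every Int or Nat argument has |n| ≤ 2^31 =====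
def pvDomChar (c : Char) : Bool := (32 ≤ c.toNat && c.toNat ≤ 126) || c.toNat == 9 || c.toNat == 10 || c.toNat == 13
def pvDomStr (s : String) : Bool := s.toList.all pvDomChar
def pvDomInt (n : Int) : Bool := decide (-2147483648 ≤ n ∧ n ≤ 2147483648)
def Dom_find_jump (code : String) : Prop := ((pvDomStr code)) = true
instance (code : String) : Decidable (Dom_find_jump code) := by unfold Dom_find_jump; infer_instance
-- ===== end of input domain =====

-- B replaces A's quadratic per-'[' rescans with one stack pass plus a sort by opening
-- position (measured faster, asymptotically O(n log n) vs O(n^2)); equal on Pre_ (A raises elsewhere).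


-- ===== PORT A =====
-- inner `for searching_code_pos, searching_letter in enumerate(code[code_pos+1:])` loop of A:
-- returns the offset at which `needed` reaches 0; none = the loop exhausts (Python then raises SyntaxError)
def scanA : List Char → Int → Option Nat
  | [], _ => none
  | c :: rest, needed =>
    let needed := if c = '[' then needed + 1 else needed
    let needed := if c = ']' then needed - 1 else needed
    if needed = 0 then some 0 else (scanA rest needed).map (· + 1)

-- the outer `while code_pos < len(code)` loop of A
def loopA (l : List Char) (jumps : PySem.Dict Int Int) (pos : Nat) : PySem.Dict Int Int :=
  if h : pos < l.length then
    let jumps :=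
      if l[pos] = '[' then
        match scanA (l.drop (pos + 1)) 1 with
        | some s =>
            (jumps.insert (pos : Int) ((pos : Int) + (s : Int) + 1)).insert
              ((pos : Int) + (s : Int) + 1) (pos : Int)
        | none => jumps      -- Python raises SyntaxError here; such inputs are outside Pre_
      else jumps
    loopA l jumps (pos + 1)
  else jumps
termination_by l.length - pos

def find_jump (code : String) : List (Int × Int) :=
  (loopA code.toList PySem.Dict.empty 0).items

-- ===== PORT B =====
-- one step of B's single pass; the Python stack grows/pops at its right end, modelled here at the list head
def stepB (st : List Int × List (Int × Int)) (p : Int × Char) : List Int × List (Int × Int) :=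
  if p.2 = '[' then (p.1 :: st.1, st.2)
  else if p.2 = ']' then
    match st.1 with
    | o :: rest => (rest, st.2 ++ [(o, p.1)])
    | [] => st
  else st

def find_jump_alt (code : String) : List (Int × Int) :=
  let res := (PySem.List.enumerate code.toList 0).foldl stepB ([], [])
  -- Python raises SyntaxError when res.1 ≠ []; such inputs are outside Pre_
  let sortedPairs := PySem.List.sorted res.2 (fun p => p.1) false
  (sortedPairs.foldl
      (fun (d : PySem.Dict Int Int) pc => (d.insert pc.1 pc.2).insert pc.2 pc.1)
      PySem.Dict.empty).items

-- ===== PRECONDITION & SPEC =====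
-- A raises SyntaxError exactly when some '[' has no matching ']', i.e. when some suffix
-- contains more '[' than ']'; Pre_ excludes exactly those inputs (B's Python also raises there).
def Pre_find_jump (code : String) : Prop :=
  ∀ p : Nat, p < code.toList.length →
    (code.toList.drop p).count '[' ≤ (code.toList.drop p).count ']'
instance (code : String) : Decidable (Pre_find_jump code) := by unfold Pre_find_jump; infer_instance

def pvWitness_find_jump : String := "a[b[-]+]c[]"

def Spec_find_jump (code : String) (out : List (Int × Int)) : Prop := out = find_jump_alt code
instance (code : String) (out : List (Int × Int)) : Decidable (Spec_find_jump code out) := by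
  unfold Spec_find_jump; infer_instance

-- ===== CLAIM (what is proved, stated in full; the proofs are below) =====
def Claim_equal_find_jump : Prop :=
  ∀ (code : String), Dom_find_jump code → Pre_find_jump code →
    Spec_find_jump code (find_jump code)

-- ===== LEMMAS AND PROOFS =====

def pvAdj (c : Char) (k : Int) : Int :=
  let k := if c = '[' then k + 1 else k
  if c = ']' then k - 1 else k

def pvBal (cs : List Char) : Int := (cs.count '[' : Int) - (cs.count ']' : Int)

-- the slice of code strictly between position q and position i
def pvSeg (l : List Char) (q i : Nat) : List Char := (l.drop (q + 1)).take (i - (q + 1))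

-- the jump target A computes for an opening bracket at q (meaningful when scanA succeeds)
def pvMatch (l : List Char) (q : Nat) : Nat := q + (scanA (l.drop (q + 1)) 1).getD 0 + 1

def pvOpens (l : List Char) : List Nat :=
  (List.range l.length).filter (fun q => l[q]? == some '[')

def pvPairI (l : List Char) (q : Nat) : Int × Int := ((q : Int), (pvMatch l q : Int))

-- loop invariant for B's single pass after i characters: stN are the still-open '['
-- positions (top first, the j-th needing `needed = j+1` more ']'s), psN the matched pairs
def pvInv (l : List Char) (i : Nat) (stN : List Nat) (psN : List (Nat × Nat)) : Prop :=
  (∀ j (hj : j < stN.length),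
      stN[j] + 1 ≤ i ∧ l[stN[j]]? = some '[' ∧
      scanA (pvSeg l stN[j] i) 1 = none ∧ pvBal (pvSeg l stN[j] i) = j) ∧
  (∀ p ∈ psN, ∃ s, scanA (l.drop (p.1 + 1)) 1 = some s ∧ p.2 = p.1 + s + 1) ∧
  (stN ++ psN.map Prod.fst).Perm ((List.range i).filter (fun q => l[q]? == some '['))

lemma scanA_cons (c : Char) (rest : List Char) (k : Int) :
    scanA (c :: rest) k =
      if pvAdj c k = 0 then some 0 else (scanA rest (pvAdj c k)).map (· + 1) := rfl

lemma pvBal_append (a b : List Char) : pvBal (a ++ b) = pvBal a + pvBal b := by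
  simp [pvBal, List.count_append]; ring

lemma pvAdj_eq (c : Char) (k : Int) : pvAdj c k = k + pvBal [c] := by
  simp [pvAdj, pvBal, List.count_singleton]
  by_cases h1 : c = '['
  · subst h1; simp
  · by_cases h2 : c = ']' <;> simp [h1, h2]
    ring

lemma pvBal_open : pvBal ['['] = 1 := by decide

lemma pvBal_close : pvBal [']'] = -1 := by decide

lemma pvBal_other (c : Char) (h1 : c ≠ '[') (h2 : c ≠ ']') : pvBal [c] = 0 := by
  simp [pvBal, List.count_nil, h1, h2]

lemma scanA_snoc (a : List Char) (c : Char) (k : Int) :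
    scanA (a ++ [c]) k =
      match scanA a k with
      | some s => some s
      | none => if k + pvBal (a ++ [c]) = 0 then some a.length else none := by
  induction a generalizing k with
  | nil =>
      simp only [List.nil_append, scanA, scanA_cons, pvAdj_eq]
      by_cases h : k + pvBal [c] = 0 <;> simp [h]
  | cons d t ih =>
      rw [List.cons_append, scanA_cons, scanA_cons]
      by_cases h : pvAdj d k = 0
      · simp [h]
      · simp only [if_neg h, ih (pvAdj d k)]
        cases hst : scanA t (pvAdj d k) with
        | some s => simp
        | none =>
            clear hst
            have heq2 : pvAdj d k + pvBal (t ++ [c]) = k + pvBal (d :: t ++ [c]) := by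
              rw [pvAdj_eq]
              have : pvBal (d :: (t ++ [c])) = pvBal [d] + pvBal (t ++ [c]) := by
                have := pvBal_append [d] (t ++ [c]); simpa using this
              simp only [List.cons_append] at *
              omega
            simp only [heq2]
            by_cases h0 : k + pvBal (d :: t ++ [c]) = 0 <;> simp [h0]

lemma scanA_append_some (a b : List Char) (k : Int) (s : Nat)
    (h : scanA a k = some s) : scanA (a ++ b) k = some s := by
  induction a generalizing k s with
  | nil => simp [scanA] at h
  | cons d t ih =>
      rw [List.cons_append, scanA_cons]
      rw [scanA_cons] at h
      by_cases h0 : pvAdj d k = 0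
      · simpa [h0] using h
      · simp only [if_neg h0] at h ⊢
        cases hst : scanA t (pvAdj d k) with
        | none => simp [hst] at h
        | some s' =>
            simp [hst] at h
            simp [ih _ _ hst, ← h]

lemma pvSeg_snoc (l : List Char) (q i : Nat) (hq : q + 1 ≤ i) (hi : i < l.length) :
    pvSeg l q (i + 1) = pvSeg l q i ++ [l[i]] := by
  have h1 : i + 1 - (q + 1) = (i - (q + 1)) + 1 := by omega
  have h2 : (l.drop (q + 1))[i - (q + 1)]? = some l[i] := by
    rw [List.getElem?_drop]
    have : q + 1 + (i - (q + 1)) = i := by omega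
    rw [this, List.getElem?_eq_getElem hi]
  simp [pvSeg, h1, List.take_add_one, h2]

lemma pvSeg_full (l : List Char) (q : Nat) : pvSeg l q l.length = l.drop (q + 1) := by
  apply List.take_of_length_le
  simp

lemma drop_eq_pvSeg_append (l : List Char) (q i : Nat) (_h : q + 1 ≤ i) :
    l.drop (q + 1) = pvSeg l q i ++ l.drop i := by
  have : (l.drop (q + 1)).drop (i - (q + 1)) = l.drop i := by
    rw [List.drop_drop]; congr 1; omega
  rw [pvSeg, ← this, List.take_append_drop]

lemma pvSeg_len (l : List Char) (q i : Nat) (_hq : q + 1 ≤ i) (hi : i ≤ l.length) :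
    (pvSeg l q i).length = i - (q + 1) := by
  simp [pvSeg]; omega

-- the single-pass state after reading i characters, with its invariant
lemma pvInvB (l : List Char) (i : Nat) (hi : i ≤ l.length) :
    ∃ (stN : List Nat) (psN : List (Nat × Nat)),
      (PySem.List.enumerate (l.take i) 0).foldl stepB ([], []) =
        (stN.map (fun q => (q : Int)), psN.map (fun p => ((p.1 : Int), (p.2 : Int)))) ∧
      pvInv l i stN psN := by
  induction i with
  | zero =>
      refine ⟨[], [], by simp, ?_⟩
      refine ⟨by simp, by simp, by simp⟩
  | succ i ih =>
      have hi' : i < l.length := by omega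
      obtain ⟨stN, psN, heq, hst, hps, hperm⟩ := ih (by omega)
      have htake : l.take (i + 1) = l.take i ++ [l[i]] := by
        rw [List.take_add_one, List.getElem?_eq_getElem hi']; rfl
      have hlen : (l.take i).length = i := by simp; omega
      have hfold : (PySem.List.enumerate (l.take (i + 1)) 0).foldl stepB ([], []) =
          stepB (stN.map (fun q => (q : Int)), psN.map (fun p => ((p.1 : Int), (p.2 : Int))))
            ((i : Int), l[i]) := by
        rw [htake, PySem.List.enumerate_append, List.foldl_append, heq]
        simp [hlen, PySem.List.enumerate]
      have hrange : (List.range (i + 1)).filter (fun q => l[q]? == some '[') =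
          ((List.range i).filter (fun q => l[q]? == some '[')) ++
            (if l[i]? == some '[' then [i] else []) := by
        rw [List.range_succ, List.filter_append]
        by_cases h : l[i]? == some '[' <;> simp [h]
      by_cases hbr : l[i] = '['
      · -- push
        refine ⟨i :: stN, psN, ?_, ?_, hps, ?_⟩
        · rw [hfold]; simp [stepB, hbr]
        · intro j hj
          cases j with
          | zero =>
              have hseg0 : pvSeg l i (i + 1) = [] := by simp [pvSeg]
              simp only [List.getElem_cons_zero]
              exact ⟨le_rfl, by simp [List.getElem?_eq_getElem hi', hbr],
                by simp [hseg0, scanA], by simp [hseg0, pvBal]⟩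
          | succ j =>
              simp only [List.length_cons] at hj
              have hj' : j < stN.length := by omega
              obtain ⟨h1, h2, h3, h4⟩ := hst j hj'
              simp only [List.getElem_cons_succ]
              have hseg := pvSeg_snoc l stN[j] i h1 hi'
              refine ⟨by omega, h2, ?_, ?_⟩
              · rw [hseg, scanA_snoc, h3, hbr]
                have hb : pvBal (pvSeg l stN[j] i ++ ['[']) = (j : Int) + 1 := by
                  rw [pvBal_append, h4, pvBal_open]
                rw [hb]
                have hne : (1 : Int) + ((j : Int) + 1) ≠ 0 := by omega
                simp [hne]
              · rw [hseg, hbr, pvBal_append, h4, pvBal_open]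
                omega
        · rw [hrange]
          have h1 : (l[i]? == some '[') = true := by
            simp [List.getElem?_eq_getElem hi', hbr]
          rw [if_pos h1]
          exact (hperm.cons i).trans (List.perm_append_singleton _ _).symm
      · by_cases hbc : l[i] = ']'
        · cases stN with
          | nil =>
              -- stray ']' with empty stack: ignored
              refine ⟨[], psN, ?_, by simp, hps, ?_⟩
              · rw [hfold]; simp [stepB, hbc]
              · rw [hrange]
                have h1 : ¬((l[i]? == some '[') = true) := by
                  simp [List.getElem?_eq_getElem hi', hbc]
                rw [if_neg h1]
                simpa using hperm
          | cons q rest =>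
              -- pop: q matches at i
              obtain ⟨hq1, hq2, hq3, hq4⟩ := hst 0 (by simp)
              simp only [List.getElem_cons_zero] at hq1 hq2 hq3 hq4
              have hseg := pvSeg_snoc l q i hq1 hi'
              have hmatch : scanA (l.drop (q + 1)) 1 = some (i - (q + 1)) := by
                have hsome : scanA (pvSeg l q (i + 1)) 1 = some (i - (q + 1)) := by
                  rw [hseg, scanA_snoc, hq3, hbc]
                  have hb : pvBal (pvSeg l q i ++ [']']) = -1 := by
                    rw [pvBal_append, hq4, pvBal_close]; omega
                  rw [hb]
                  simp [pvSeg_len l q i hq1 (by omega)]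
                have hdeq := drop_eq_pvSeg_append l q (i + 1) (by omega)
                rw [hdeq]
                exact scanA_append_some _ _ _ _ hsome
              refine ⟨rest, psN ++ [(q, i)], ?_, ?_, ?_, ?_⟩
              · rw [hfold]; simp [stepB, hbc]
              · intro j hj
                have hj' : j + 1 < (q :: rest).length := by simpa using hj
                obtain ⟨h1, h2, h3, h4⟩ := hst (j + 1) hj'
                simp only [List.getElem_cons_succ] at h1 h2 h3 h4
                have hseg' := pvSeg_snoc l rest[j] i h1 hi'
                refine ⟨by omega, h2, ?_, ?_⟩
                · rw [hseg', scanA_snoc, h3, hbc]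
                  have hb : pvBal (pvSeg l rest[j] i ++ [']']) = (j : Int) := by
                    rw [pvBal_append, h4, pvBal_close]; omega
                  rw [hb]
                  have hne : (1 : Int) + (j : Int) ≠ 0 := by omega
                  simp [hne]
                · rw [hseg', hbc, pvBal_append, h4, pvBal_close]
                  omega
              · intro p hp
                rcases List.mem_append.1 hp with h | h
                · exact hps p h
                · simp at h
                  rw [h]
                  exact ⟨i - (q + 1), hmatch, by omega⟩
              · rw [hrange]
                have h1 : ¬((l[i]? == some '[') = true) := by
                  simp [List.getElem?_eq_getElem hi', hbc]
                rw [if_neg h1, List.append_nil]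
                have h2 : (rest ++ (psN ++ [(q, i)]).map Prod.fst) =
                    (rest ++ psN.map Prod.fst) ++ [q] := by simp
                rw [h2]
                exact (List.perm_append_singleton _ _).trans hperm
        · -- not a bracket
          refine ⟨stN, psN, ?_, ?_, hps, ?_⟩
          · rw [hfold]; simp [stepB, hbr, hbc]
          · intro j hj
            obtain ⟨h1, h2, h3, h4⟩ := hst j hj
            have hseg := pvSeg_snoc l stN[j] i h1 hi'
            refine ⟨by omega, h2, ?_, ?_⟩
            · rw [hseg, scanA_snoc, h3]
              have hb : pvBal (pvSeg l stN[j] i ++ [l[i]]) = (j : Int) := by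
                rw [pvBal_append, h4, pvBal_other l[i] hbr hbc]; omega
              rw [hb]
              have hne : (1 : Int) + (j : Int) ≠ 0 := by omega
              simp [hne]
            · rw [hseg, pvBal_append, h4, pvBal_other l[i] hbr hbc]
              omega
          · rw [hrange]
            have h1 : ¬((l[i]? == some '[') = true) := by
              simp [List.getElem?_eq_getElem hi', hbr]
            rw [if_neg h1]
            simpa using hperm

-- under Pre_ the stack is empty at the end of the pass
lemma pvFinal (code : String) (hpre : Pre_find_jump code) :
    ∃ psN : List (Nat × Nat),
      (PySem.List.enumerate code.toList 0).foldl stepB ([], []) =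
        ([], psN.map (fun p => ((p.1 : Int), (p.2 : Int)))) ∧
      (∀ p ∈ psN, ∃ s, scanA (code.toList.drop (p.1 + 1)) 1 = some s ∧ p.2 = p.1 + s + 1) ∧
      (psN.map Prod.fst).Perm (pvOpens code.toList) := by
  obtain ⟨stN, psN, heq, hst, hps, hperm⟩ := pvInvB code.toList code.toList.length le_rfl
  rw [List.take_length] at heq
  cases stN with
  | cons q rest =>
      exfalso
      obtain ⟨h1, h2, _, h4⟩ := hst 0 (by simp)
      simp only [List.getElem_cons_zero] at h1 h2 h4
      rw [pvSeg_full] at h4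
      have hq : q < code.toList.length := by omega
      have hdrop : code.toList.drop q = code.toList[q] :: code.toList.drop (q + 1) :=
        List.drop_eq_getElem_cons hq
      have hc : code.toList[q] = '[' := by
        have hg := List.getElem?_eq_getElem hq
        rw [h2] at hg
        exact (Option.some_injective _ hg).symm
      have hcount := hpre q hq
      rw [hdrop, hc] at hcount
      simp at hcount
      unfold pvBal at h4
      omega
  | nil =>
      exact ⟨psN, heq, hps, by simpa [pvOpens] using hperm⟩

lemma pv_filter_range_end (n pos : Nat) (P : Nat → Bool) (h : n ≤ pos) :
    (List.range n).filter (fun q => decide (pos ≤ q) && P q) = [] := by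
  apply List.filter_eq_nil_iff.2
  intro q hq
  have : q < n := List.mem_range.1 hq
  simp; omega

lemma pv_filter_range_split (n pos : Nat) (P : Nat → Bool) (h : pos < n) :
    (List.range n).filter (fun q => decide (pos ≤ q) && P q) =
      (if P pos then [pos] else []) ++
        (List.range n).filter (fun q => decide (pos + 1 ≤ q) && P q) := by
  induction n with
  | zero => omega
  | succ m ih =>
      rw [List.range_succ, List.filter_append, List.filter_append]
      by_cases hm : pos < m
      · rw [ih hm]
        have : (List.filter (fun q => decide (pos ≤ q) && P q) [m]) =
            (List.filter (fun q => decide (pos + 1 ≤ q) && P q) [m]) := by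
          simp only [List.filter]
          have h1 : decide (pos ≤ m) = true := by simp; omega
          have h2 : decide (pos + 1 ≤ m) = true := by simp; omega
          rw [h1, h2]
        rw [this, List.append_assoc]
      · have hpm : pos = m := by omega
        subst hpm
        have hfil : (List.range pos).filter (fun q => decide (pos ≤ q) && P q) = [] := by
          apply List.filter_eq_nil_iff.2
          intro q hq
          have : q < pos := List.mem_range.1 hq
          simp; omega
        have hfil2 : (List.range pos).filter (fun q => decide (pos + 1 ≤ q) && P q) = [] := by
          apply List.filter_eq_nil_iff.2
          intro q hq
          have : q < pos := List.mem_range.1 hq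
          simp; omega
        have hfil3 : (List.filter (fun q => decide (pos + 1 ≤ q) && P q) [pos]) = [] := by
          simp
        rw [hfil, hfil2, hfil3]
        by_cases hp : P pos <;> simp [hp]

-- A's while loop, rewritten as a fold of double-inserts over the opening brackets from pos on
lemma pvLoopA_eq (l : List Char) (pos : Nat) (d : PySem.Dict Int Int)
    (htot : ∀ q : Nat, l[q]? = some '[' → (scanA (l.drop (q + 1)) 1).isSome) :
    loopA l d pos =
      (((List.range l.length).filter (fun q => decide (pos ≤ q) && (l[q]? == some '['))).map
          (pvPairI l)).foldl
        (fun (d : PySem.Dict Int Int) pc => (d.insert pc.1 pc.2).insert pc.2 pc.1) d := by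
  by_cases h : pos < l.length
  · rw [loopA, dif_pos h, pv_filter_range_split l.length pos _ h]
    by_cases hbr : l[pos] = '['
    · have hget : l[pos]? = some '[' := by rw [List.getElem?_eq_getElem h, hbr]
      have hsome := htot pos hget
      obtain ⟨s, hs⟩ := Option.isSome_iff_exists.1 hsome
      have hPpos : (l[pos]? == some '[') = true := by simp [hget]
      rw [if_pos hPpos]
      simp only [if_pos hbr, hs]
      rw [pvLoopA_eq l (pos + 1) _ htot]
      have hval : (pos : Int) + (s : Int) + 1 = ((pvMatch l pos : Nat) : Int) := by
        simp [pvMatch, hs]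
      simp only [List.map_append, List.foldl_append, List.map_cons, List.map_nil,
        List.foldl_cons, List.foldl_nil, pvPairI, hval]
    · have hget : ¬(l[pos]? == some '[') = true := by
        simp [List.getElem?_eq_getElem h, hbr]
      rw [if_neg hget]
      simp only [if_neg hbr]
      rw [pvLoopA_eq l (pos + 1) _ htot]
      simp
  · rw [loopA, dif_neg h, pv_filter_range_end l.length pos _ (by omega)]
    simp
termination_by l.length - pos

lemma pvOpens_pairwise (l : List Char) : (pvOpens l).Pairwise (· < ·) :=
  List.pairwise_lt_range.filter _

theorem find_jump_spec_aux (code : String) (hpre : Pre_find_jump code) :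
    find_jump code = find_jump_alt code := by
  set l := code.toList with hl
  obtain ⟨psN, heq, hps, hperm⟩ := pvFinal code hpre
  rw [← hl] at heq hps hperm
  have htot : ∀ q : Nat, l[q]? = some '[' → (scanA (l.drop (q + 1)) 1).isSome := by
    intro q hq
    have hqmem : q ∈ pvOpens l := by
      have hqlt : q < l.length := by
        rcases lt_or_ge q l.length with h | h
        · exact h
        · rw [List.getElem?_eq_none (by omega)] at hq; simp at hq
      have hc : l[q] = '[' := by
        rw [List.getElem?_eq_getElem hqlt] at hq
        exact Option.some.inj hq
      simp [pvOpens, List.mem_filter, List.mem_range, hqlt, hc]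
    have : q ∈ psN.map Prod.fst := (hperm.mem_iff).2 hqmem
    obtain ⟨p, hp, hfst⟩ := List.mem_map.1 this
    obtain ⟨s, hs, _⟩ := hps p hp
    rw [← hfst, hs]
    rfl
  -- each matched pair is (q, pvMatch q)
  have hpair : ∀ p ∈ psN, (((p.1 : Int), (p.2 : Int)) : Int × Int) = pvPairI l p.1 := by
    intro p hp
    obtain ⟨s, hs, h2⟩ := hps p hp
    simp [pvPairI, pvMatch, hs, h2]
  -- B's sorted pair list is exactly the opening brackets in increasing order
  have hsorted : PySem.List.sorted (psN.map (fun p => ((p.1 : Int), (p.2 : Int))))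
      (fun p => p.1) false = (pvOpens l).map (pvPairI l) := by
    apply PySem.List.sorted_eq_of_perm_of_pairwise_lt
    · have e1 : psN.map (fun p => ((p.1 : Int), (p.2 : Int))) =
          (psN.map Prod.fst).map (pvPairI l) := by
        rw [List.map_map]
        exact List.map_congr_left (fun p hp => (hpair p hp))
      rw [e1]
      exact (hperm.map _).symm
    · have := pvOpens_pairwise l
      rw [List.pairwise_map]
      exact this.imp (fun {a b} hab => by simpa [pvPairI] using hab)
  -- assemble both sides
  have hA : find_jump code =
      ((((pvOpens l).map (pvPairI l))).foldl
        (fun (d : PySem.Dict Int Int) pc => (d.insert pc.1 pc.2).insert pc.2 pc.1)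
        PySem.Dict.empty).items := by
    have hfil : (List.range l.length).filter
        (fun q => decide (0 ≤ q) && (l[q]? == some '[')) = pvOpens l := by
      unfold pvOpens
      apply List.filter_congr
      intro q hq
      simp
    rw [find_jump, ← hl, pvLoopA_eq l 0 _ htot, hfil]
  have hB : find_jump_alt code =
      ((((pvOpens l).map (pvPairI l))).foldl
        (fun (d : PySem.Dict Int Int) pc => (d.insert pc.1 pc.2).insert pc.2 pc.1)
        PySem.Dict.empty).items := by
    rw [find_jump_alt]
    simp only [← hl, heq, hsorted]
  rw [hA, hB]

-- ===== VERDICT (by name: the statement is the Claim_ definition above) =====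
theorem find_jump_spec : Claim_equal_find_jump := by
  intro code _ hpre
  unfold Spec_find_jump
  exact find_jump_spec_aux code hpre
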